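-- pv_equiv track=rewrite | github.com/kckckcd/cs-61a-fall2020- | homework/hw02/hw02.py | missing_digits
-- ===== SOURCE A (Python) =====
-- def split(num):
--     num %= 100
--     return num % 10, num // 10
--
-- def missing_digits(n):
--     """Given a number a that is in sorted, increasing order,
--     return the number of missing digits in n. A missing digit is
--     a number between the first and last digit of a that is not in n.
--     >>> missing_digits(1248) # 3, 5, 6, 7
--     4
--     >>> missing_digits(1122) # No missing numbers
--     0
--     >>> missing_digits(123456) # No missing numbers
--     0
--     >>> missing_digits(3558) # 4, 6, 7
--     3
--     >>> missing_digits(35578) # 4, 6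
--     2
--     >>> missing_digits(12456) # 3
--     1
--     >>> missing_digits(16789) # 2, 3, 4, 5
--     4
--     >>> missing_digits(19) # 2, 3, 4, 5, 6, 7, 8
--     7
--     >>> missing_digits(4) # No missing numbers between 4 and 4
--     0
--     >>> from construct_check import check
--     >>> # ban while or for loops
--     >>> check(HW_SOURCE_FILE, 'missing_digits', ['While', 'For'])
--     True
--     """
--     "*** YOUR CODE HERE ***"
--     if n < 10:
--         return 0
--     elif n < 100:
--         last, last_secend =  split(n)
--         return last - last_secend - 1 if last > last_secend else 0
--     else:
--         last, last_secend = split(n)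
--         rest = last - last_secend - 1 if last > last_secend else 0
--         return rest + missing_digits(n//10)
-- ===== SOURCE B (Python) =====
-- def missing_digits(n):
--     if n < 10:
--         return 0
--     digits = []
--     while n > 0:
--         digits.append(n % 10)
--         n //= 10
--     digits.reverse()
--     return sum(max(0, b - a - 1) for a, b in zip(digits, digits[1:]))
-- ===== Notes on version B (the rewrite author's own statement) =====
-- stated objective: idiomatic
-- what changed: Replaces the digit-pair recursion with modular splitting by an iterative digit extraction into a list followed by a single pass summing max(0, b-a-1) over consecutive digit pairs.
import Mathlib
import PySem

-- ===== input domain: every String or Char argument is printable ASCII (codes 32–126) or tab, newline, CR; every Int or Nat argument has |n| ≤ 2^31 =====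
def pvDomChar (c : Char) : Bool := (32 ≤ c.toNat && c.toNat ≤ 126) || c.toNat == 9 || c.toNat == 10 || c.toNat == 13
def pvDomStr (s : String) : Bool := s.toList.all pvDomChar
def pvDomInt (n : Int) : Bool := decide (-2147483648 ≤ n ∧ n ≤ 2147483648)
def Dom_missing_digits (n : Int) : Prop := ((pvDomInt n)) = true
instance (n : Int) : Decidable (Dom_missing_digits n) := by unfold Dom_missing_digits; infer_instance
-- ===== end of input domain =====

-- B replaces the digit-pair recursion by iterative digit extraction into a list
-- plus a single pass over consecutive digit pairs (idiomatic; same cost).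

-- ===== PORT A =====
def pySplit (num : Int) : Int × Int :=
  let num := PySem.Int.mod num 100
  (PySem.Int.mod num 10, PySem.Int.floordiv num 10)

def missing_digits (n : Int) : Int :=
  if _h1 : n < 10 then 0
  else if _h2 : n < 100 then
    let p := pySplit n
    if p.1 > p.2 then p.1 - p.2 - 1 else 0
  else
    let p := pySplit n
    let rest := if p.1 > p.2 then p.1 - p.2 - 1 else 0
    rest + missing_digits (PySem.Int.floordiv n 10)
termination_by n.toNat
decreasing_by
  rw [PySem.Int.floordiv_eq_ediv_of_pos (by norm_num : (0:Int) < 10)]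
  omega

-- ===== PORT B =====
-- the `while n > 0: digits.append(n % 10); n //= 10` loop of Source B (digits built last-first)
def digitsRevLoop (n : Int) : List Int :=
  if _h : 0 < n then
    PySem.Int.mod n 10 :: digitsRevLoop (PySem.Int.floordiv n 10)
  else []
termination_by n.toNat
decreasing_by
  rw [PySem.Int.floordiv_eq_ediv_of_pos (by norm_num : (0:Int) < 10)]
  omega

def missing_digits_alt (n : Int) : Int :=
  if n < 10 then 0
  else
    let digits := (digitsRevLoop n).reverse
    ((digits.zip (PySem.List.slice digits (some 1) none)).map
      (fun p => max 0 (p.2 - p.1 - 1))).sum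

-- ===== PRECONDITION & SPEC =====
def Spec_missing_digits (n : Int) (out : Int) : Prop := out = missing_digits_alt n
instance (n : Int) (out : Int) : Decidable (Spec_missing_digits n out) := by unfold Spec_missing_digits; infer_instance

-- ===== CLAIM (what is proved, stated in full; the proofs are below) =====
def Claim_equal_missing_digits : Prop := ∀ (n : Int), Dom_missing_digits n → Spec_missing_digits n (missing_digits n)

-- ===== LEMMAS AND PROOFS =====

-- pair sum of B's final pass, on a plain list
def pairSum (l : List Int) : Int :=
  ((l.zip l.tail).map (fun p => max 0 (p.2 - p.1 - 1))).sum

lemma pairSum_append_singleton (ys : List Int) (x : Int) :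
    pairSum (ys ++ [x]) =
      pairSum ys + (match ys.getLast? with
                    | none => 0
                    | some y => max 0 (x - y - 1)) := by
  induction ys with
  | nil => simp [pairSum]
  | cons a t ih =>
    cases t with
    | nil => simp [pairSum]
    | cons b t' =>
      have h1 : pairSum ((a :: b :: t') ++ [x]) = max 0 (b - a - 1) + pairSum ((b :: t') ++ [x]) := by
        simp [pairSum]
      have h2 : pairSum (a :: b :: t') = max 0 (b - a - 1) + pairSum (b :: t') := by
        simp [pairSum]
      rw [h1, h2, ih, List.getLast?_cons_cons]
      ring

lemma digitsRevLoop_pos (n : Int) (h : 0 < n) :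
    digitsRevLoop n = n % 10 :: digitsRevLoop (n / 10) := by
  rw [digitsRevLoop]
  rw [PySem.Int.mod_eq_emod_of_pos (by norm_num : (0:Int) < 10),
      PySem.Int.floordiv_eq_ediv_of_pos (by norm_num : (0:Int) < 10)]
  simp [h]

lemma digitsRevLoop_nonpos (n : Int) (h : ¬ 0 < n) : digitsRevLoop n = [] := by
  rw [digitsRevLoop]; simp [h]

lemma head?_digitsRevLoop (n : Int) (h : 0 < n) :
    (digitsRevLoop n).head? = some (n % 10) := by
  rw [digitsRevLoop_pos n h]; rfl

-- B in terms of pairSum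
lemma alt_eq_pairSum (n : Int) (h : 10 ≤ n) :
    missing_digits_alt n = pairSum ((digitsRevLoop n).reverse) := by
  rw [missing_digits_alt]
  simp [pairSum, PySem.List.slice_from_one, show ¬ n < 10 by omega]

-- pairSum of the reversed digit list, one step (n ≥ 10)
lemma pairSum_step (n : Int) (h : 10 ≤ n) :
    pairSum ((digitsRevLoop n).reverse) =
      pairSum ((digitsRevLoop (n / 10)).reverse) + max 0 (n % 10 - (n / 10) % 10 - 1) := by
  rw [digitsRevLoop_pos n (by omega), List.reverse_cons, pairSum_append_singleton]
  have h10 : 0 < n / 10 := by omega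
  have hlast : (digitsRevLoop (n / 10)).reverse.getLast? = some ((n / 10) % 10) := by
    rw [List.getLast?_reverse, head?_digitsRevLoop _ h10]
  rw [hlast]

-- A's one-step characterisation for n ≥ 10
lemma A_step (n : Int) (h : 10 ≤ n) :
    missing_digits n =
      max 0 (n % 10 - (n / 10) % 10 - 1) + (if n < 100 then 0 else missing_digits (n / 10)) := by
  have e100 : PySem.Int.mod n 100 = n % 100 := PySem.Int.mod_eq_emod_of_pos (by norm_num)
  have e10 : PySem.Int.mod (n % 100) 10 = n % 100 % 10 := PySem.Int.mod_eq_emod_of_pos (by norm_num)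
  have d10 : PySem.Int.floordiv (n % 100) 10 = n % 100 / 10 :=
    PySem.Int.floordiv_eq_ediv_of_pos (by norm_num)
  have dn10 : PySem.Int.floordiv n 10 = n / 10 := PySem.Int.floordiv_eq_ediv_of_pos (by norm_num)
  rw [missing_digits, dif_neg (show ¬ n < 10 by omega)]
  by_cases h2 : n < 100
  · rw [dif_pos h2, if_pos h2]
    simp only [pySplit, e100, e10, d10]
    rw [max_def]; split_ifs <;> omega
  · rw [dif_neg h2, if_neg h2, dn10]
    simp only [pySplit, e100, e10, d10]
    rw [max_def]; split_ifs <;> omega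

theorem main_eq : ∀ (m : Nat) (n : Int), n.toNat ≤ m → missing_digits n = missing_digits_alt n := by
  intro m
  induction m with
  | zero =>
    intro n hn
    have hlt : n < 10 := by omega
    rw [missing_digits, missing_digits_alt]
    simp [hlt]
  | succ k ih =>
    intro n hn
    by_cases h1 : n < 10
    · rw [missing_digits, missing_digits_alt]; simp [h1]
    · have h10 : 10 ≤ n := by omega
      rw [A_step n h10, alt_eq_pairSum n h10, pairSum_step n h10]
      by_cases h2 : n < 100
      · have hsing : digitsRevLoop (n / 10) = [(n / 10) % 10] := by
          rw [digitsRevLoop_pos _ (by omega), digitsRevLoop_nonpos _ (by omega)]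
        rw [if_pos h2, hsing]
        simp [pairSum]
      · rw [if_neg h2, ih (n / 10) (by omega),
            alt_eq_pairSum (n / 10) (by omega)]
        ring

-- ===== VERDICT (by name: the statement is the Claim_ definition above) =====
theorem missing_digits_spec : Claim_equal_missing_digits := by
  intro n _
  unfold Spec_missing_digits
  exact main_eq n.toNat n le_rfl
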